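-- pv_equiv track=rewrite | github.com/josojo/smarthammer | hammer/proof/proof.py | extract_top_level_blocks
-- ===== SOURCE A (Python) =====
-- def extract_top_level_blocks(text: str) -> list[str]:
--     """
--     Extracts top-level blocks enclosed in (), [], or {} from a string,
--     correctly handling nesting.
--     """
--     blocks = []
--     balance = 0
--     current_block_start = -1
--     expected_closer = None
--     opener = None  # Track the specific opener '(', '[', or '{'
--
--     for i, char in enumerate(text):
--         if current_block_start == -1:  # Looking for start of a block
--             if char in "([{":
--                 current_block_start = i
--                 opener = char
--                 if char == "(":
--                     expected_closer = ")"
--                 elif char == "[":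
--                     expected_closer = "]"
--                 else:
--                     expected_closer = "}"
--                 balance = 1
--         else:  # Inside a block
--             if char == opener:  # Nested same opener
--                 balance += 1
--             elif char == expected_closer:  # Corresponding closer
--                 balance -= 1
--                 if balance == 0:  # End of top-level block
--                     blocks.append(text[current_block_start : i + 1])
--                     current_block_start = -1
--                     expected_closer = None
--                     opener = None  # Reset opener
--     return [b.strip() for b in blocks]
-- ===== SOURCE B (Python) =====
-- def find_matching_close(text, i, opener, closer):
--     balance = 0
--     for j in range(i, len(text)):
--         c = text[j]
--         if c == opener:
--             balance += 1
--         elif c == closer: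
--             balance -= 1
--             if balance == 0:
--                 return j
--     return None
--
--
-- def extract_top_level_blocks(text: str) -> list[str]:
--     closers = {"(": ")", "[": "]", "{": "}"}
--     blocks = []
--     i = 0
--     n = len(text)
--     while i < n:
--         ch = text[i]
--         if ch in closers:
--             end = find_matching_close(text, i, ch, closers[ch])
--             if end is None:
--                 break
--             blocks.append(text[i : end + 1])
--             i = end + 1
--         else:
--             i += 1
--     return [b.strip() for b in blocks]
-- ===== Notes on version B (the rewrite author's own statement) =====
-- stated objective: alternative
-- what changed: Replaced A's single-pass state machine (balance/opener/closer flags threaded through one enumerate loop) by an index-advancing outer scan that, at each opener, calls a helper find_matching_close scanning forward for the matching closer, then jumps past the block.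
import Mathlib
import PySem

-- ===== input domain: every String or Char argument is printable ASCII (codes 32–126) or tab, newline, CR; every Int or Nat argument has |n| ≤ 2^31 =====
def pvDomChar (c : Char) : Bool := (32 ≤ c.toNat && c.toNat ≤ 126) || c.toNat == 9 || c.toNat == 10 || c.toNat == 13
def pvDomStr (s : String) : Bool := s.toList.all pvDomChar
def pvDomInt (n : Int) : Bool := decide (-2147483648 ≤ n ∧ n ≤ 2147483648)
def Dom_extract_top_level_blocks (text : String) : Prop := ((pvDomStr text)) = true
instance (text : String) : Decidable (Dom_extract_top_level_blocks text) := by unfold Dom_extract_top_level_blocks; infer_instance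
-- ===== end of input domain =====

-- B replaces A's one-pass balance/opener/closer state machine by an outer index scan
-- with a find-matching-close helper per block (alternative decomposition, same cost).

-- ===== PORT A =====
-- A's loop state: (blocks, balance, current_block_start, expected_closer, opener)
def pvAStep (text : String)
    (st : List String × Int × Int × Option Char × Option Char) (p : Int × Char) :
    List String × Int × Int × Option Char × Option Char :=
  let (blocks, balance, start, closer, opener) := st
  let (i, c) := p
  if start = -1 then
    if c ∈ "([{".toList then
      let closer' := if c = '(' then ')' else if c = '[' then ']' else '}'
      (blocks, 1, i, some closer', some c)
    else
      (blocks, balance, start, closer, opener)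
  else
    if some c = opener then
      (blocks, balance + 1, start, closer, opener)
    else if some c = closer then
      if balance - 1 = 0 then
        (blocks ++ [PySem.Str.slice text (some start) (some (i + 1))], balance - 1, -1, none, none)
      else
        (blocks, balance - 1, start, closer, opener)
    else
      (blocks, balance, start, closer, opener)

def extract_top_level_blocks (text : String) : List String :=
  ((PySem.List.enumerate text.toList 0).foldl (pvAStep text)
      ([], 0, -1, none, none)).1.map PySem.Str.strip

-- ===== PORT B =====
-- helper find_matching_close: scan forward from absolute index j, counting opener/closer
def pvFindClose (o cl : Char) : List Char → Int → Int → Option Int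
  | [], _, _ => none
  | c :: rest, bal, j =>
    if c = o then pvFindClose o cl rest (bal + 1) (j + 1)
    else if c = cl then
      if bal - 1 = 0 then some j else pvFindClose o cl rest (bal - 1) (j + 1)
    else pvFindClose o cl rest bal (j + 1)

-- termination fact for the outer scan: the returned index is ≥ the scan start
theorem pvFindClose_le (o cl : Char) :
    ∀ (s : List Char) (bal j r : Int), pvFindClose o cl s bal j = some r → j ≤ r := by
  intro s
  induction s with
  | nil => intro bal j r h; simp [pvFindClose] at h
  | cons c rest ih =>
    intro bal j r h
    simp only [pvFindClose] at h
    split_ifs at h with h1 h2 h3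
    · have := ih (bal + 1) (j + 1) r h; omega
    · simp at h; omega
    · have := ih (bal - 1) (j + 1) r h; omega
    · have := ih bal (j + 1) r h; omega

def pvClosers : PySem.Dict Char Char := PySem.Dict.ofList [('(', ')'), ('[', ']'), ('{', '}')]

-- outer loop: advance until an opener, find its matching closer, append the slice, jump past it
def pvScan (text : String) : List Char → Int → List String → List String
  | [], _, acc => acc
  | c :: rest, i, acc =>
    match pvClosers.get? c with
    | none => pvScan text rest (i + 1) acc
    | some cl =>
      match h : pvFindClose c cl (c :: rest) 0 i with
      | none => acc
      | some r =>
        pvScan text ((c :: rest).drop (r + 1 - i).toNat) (r + 1)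
          (acc ++ [PySem.Str.slice text (some i) (some (r + 1))])
  termination_by s _ _ => s.length
  decreasing_by
  · simp
  · have hle := pvFindClose_le c cl (c :: rest) 0 i r h
    simp only [List.length_drop, List.length_cons]
    omega

def extract_top_level_blocks_alt (text : String) : List String :=
  (pvScan text text.toList 0 []).map PySem.Str.strip

-- ===== PRECONDITION & SPEC =====
def Spec_extract_top_level_blocks (text : String) (out : List String) : Prop := out = extract_top_level_blocks_alt text
instance (text : String) (out : List String) : Decidable (Spec_extract_top_level_blocks text out) := by unfold Spec_extract_top_level_blocks; infer_instance

-- ===== CLAIM (what is proved, stated in full; the proofs are below) =====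
def Claim_equal_extract_top_level_blocks : Prop := ∀ (text : String), Dom_extract_top_level_blocks text → Spec_extract_top_level_blocks text (extract_top_level_blocks text)

-- ===== LEMMAS AND PROOFS =====

-- A's fold from an "inside a block" state behaves like pvFindClose followed by a reset fold
theorem pvInside (text : String) :
    ∀ (s : List Char) (i : Int) (blocks : List String) (b strt : Int) (o cl : Char),
      0 ≤ strt →
      ((PySem.List.enumerate s i).foldl (pvAStep text) (blocks, b, strt, some cl, some o)).1 =
        (match pvFindClose o cl s b i with
          | none => blocks
          | some r =>
            ((PySem.List.enumerate (s.drop (r + 1 - i).toNat) (r + 1)).foldl (pvAStep text)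
                (blocks ++ [PySem.Str.slice text (some strt) (some (r + 1))],
                  0, -1, none, none)).1) := by
  intro s
  induction s with
  | nil => intro i blocks b strt o cl _; simp [pvFindClose, PySem.List.enumerate_nil]
  | cons c rest ih =>
    intro i blocks b strt o cl hstrt
    rw [PySem.List.enumerate_cons]
    simp only [List.foldl_cons, pvFindClose]
    by_cases hco : c = o
    · subst hco
      have hstep : pvAStep text (blocks, b, strt, some cl, some c) (i, c) =
          (blocks, b + 1, strt, some cl, some c) := by
        simp [pvAStep]; omega
      rw [hstep, ih (i + 1) blocks (b + 1) strt c cl hstrt]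
      rcases hfc : pvFindClose c cl rest (b + 1) (i + 1) with _ | r
      · simp
      · have hr := pvFindClose_le c cl rest (b + 1) (i + 1) r hfc
        have : (r + 1 - i).toNat = (r + 1 - (i + 1)).toNat + 1 := by omega
        simp [this]
    · by_cases hccl : c = cl
      · subst hccl
        by_cases hb : b - 1 = 0
        · have hstep : pvAStep text (blocks, b, strt, some c, some o) (i, c) =
              (blocks ++ [PySem.Str.slice text (some strt) (some (i + 1))], b - 1, -1,
                none, none) := by
            simp [pvAStep, hco, hb]; omega
          rw [hstep]
          simp only [hco, hb, if_pos, if_false]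
          have h1 : ((i : Int) + 1 - i).toNat = 1 := by omega
          simp
        · have hstep : pvAStep text (blocks, b, strt, some c, some o) (i, c) =
              (blocks, b - 1, strt, some c, some o) := by
            simp [pvAStep, hco, hb]; omega
          rw [hstep, ih (i + 1) blocks (b - 1) strt o c hstrt]
          rcases hfc : pvFindClose o c rest (b - 1) (i + 1) with _ | r
          · simp [hco, hb]
          · have hr := pvFindClose_le o c rest (b - 1) (i + 1) r hfc
            have h2 : (r + 1 - i).toNat = (r + 1 - (i + 1)).toNat + 1 := by omega
            simp [hco, hb, h2]
      · have hstep : pvAStep text (blocks, b, strt, some cl, some o) (i, c) =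
            (blocks, b, strt, some cl, some o) := by
          simp [pvAStep, hco, hccl]; omega
        rw [hstep, ih (i + 1) blocks b strt o cl hstrt]
        rcases hfc : pvFindClose o cl rest b (i + 1) with _ | r
        · simp [hco, hccl]
        · have hr := pvFindClose_le o cl rest b (i + 1) r hfc
          have h2 : (r + 1 - i).toNat = (r + 1 - (i + 1)).toNat + 1 := by omega
          simp [hco, hccl, h2]

-- the literal dict of B, computed
theorem pvClosers_get (c : Char) : pvClosers.get? c =
    if c = '(' then some ')' else if c = '[' then some ']' else if c = '{' then some '}'
    else none := by
  by_cases h1 : c = '('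
  · subst h1; rfl
  by_cases h2 : c = '['
  · subst h2; rfl
  by_cases h3 : c = '{'
  · subst h3; rfl
  have e : pvClosers = { items := [('(', ')'), ('[', ']'), ('{', '}')] } := rfl
  rw [e]
  have b1 : ('(' == c) = false := by simp [Ne.symm h1]
  have b2 : ('[' == c) = false := by simp [Ne.symm h2]
  have b3 : ('{' == c) = false := by simp [Ne.symm h3]
  simp [PySem.Dict.get?, List.find?, b1, b2, b3, h1, h2, h3]

-- one step for an opener c: A enters the inside state, B calls pvFindClose; both continue alike
theorem pvIdleOpener (text : String) (n : Nat)
    (ihn : ∀ (s : List Char), s.length ≤ n → ∀ (i : Int), 0 ≤ i → ∀ (blocks : List String),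
      ((PySem.List.enumerate s i).foldl (pvAStep text) (blocks, 0, -1, none, none)).1 =
        pvScan text s i blocks)
    (c cl : Char) (rest : List Char) (hn : rest.length ≤ n) (i : Int) (hi : 0 ≤ i)
    (blocks : List String)
    (hstep : pvAStep text (blocks, 0, -1, none, none) (i, c) = (blocks, 1, i, some cl, some c))
    (hB : pvScan text (c :: rest) i blocks =
      (match pvFindClose c cl (c :: rest) 0 i with
        | none => blocks
        | some r => pvScan text ((c :: rest).drop (r + 1 - i).toNat) (r + 1)
            (blocks ++ [PySem.Str.slice text (some i) (some (r + 1))]))) :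
    ((PySem.List.enumerate (c :: rest) i).foldl (pvAStep text) (blocks, 0, -1, none, none)).1 =
      pvScan text (c :: rest) i blocks := by
  rw [PySem.List.enumerate_cons]
  simp only [List.foldl_cons]
  rw [hstep, pvInside text rest (i + 1) blocks 1 i c cl hi, hB]
  have hfirst : pvFindClose c cl (c :: rest) 0 i = pvFindClose c cl rest 1 (i + 1) := by
    simp [pvFindClose]
  rw [hfirst]
  rcases hfc : pvFindClose c cl rest 1 (i + 1) with _ | r
  · simp
  · have hr := pvFindClose_le c cl rest 1 (i + 1) r hfc
    have h2 : (r + 1 - i).toNat = (r + 1 - (i + 1)).toNat + 1 := by omega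
    simp only [h2, List.drop_succ_cons]
    exact ihn (rest.drop (r + 1 - (i + 1)).toNat) (by rw [List.length_drop]; omega) (r + 1)
      (by omega) (blocks ++ [PySem.Str.slice text (some i) (some (r + 1))])

-- A's fold from the idle state equals B's scan
theorem pvIdle (text : String) :
    ∀ (n : Nat) (s : List Char), s.length ≤ n → ∀ (i : Int), 0 ≤ i → ∀ (blocks : List String),
      ((PySem.List.enumerate s i).foldl (pvAStep text) (blocks, 0, -1, none, none)).1 =
        pvScan text s i blocks := by
  intro n
  induction n with
  | zero =>
    intro s hs i hi blocks
    have : s = [] := List.eq_nil_of_length_eq_zero (by omega)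
    subst this
    simp [pvScan, PySem.List.enumerate_nil]
  | succ n ihn =>
    intro s hs i hi blocks
    cases s with
    | nil => simp [pvScan, PySem.List.enumerate_nil]
    | cons c rest =>
      have hn : rest.length ≤ n := by simp at hs; omega
      have hmem : "([{".toList = ['(', '[', '{'] := rfl
      by_cases h1 : c = '('
      · subst h1
        refine pvIdleOpener text n ihn '(' ')' rest hn i hi blocks (by simp [pvAStep]) ?_
        rw [pvScan]; rw [pvClosers_get]
        simp only [reduceIte, Char.reduceEq]
        split <;> rename_i hx <;> simp [hx]
      by_cases h2 : c = '['
      · subst h2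
        refine pvIdleOpener text n ihn '[' ']' rest hn i hi blocks (by simp [pvAStep]) ?_
        rw [pvScan]; rw [pvClosers_get]
        simp only [reduceIte, Char.reduceEq]
        split <;> rename_i hx <;> simp [hx]
      by_cases h3 : c = '{'
      · subst h3
        refine pvIdleOpener text n ihn '{' '}' rest hn i hi blocks (by simp [pvAStep]) ?_
        rw [pvScan]; rw [pvClosers_get]
        simp only [reduceIte, Char.reduceEq]
        split <;> rename_i hx <;> simp [hx]
      · have hstep : pvAStep text (blocks, 0, -1, none, none) (i, c) =
            (blocks, 0, -1, none, none) := by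
          simp [pvAStep, hmem, h1, h2, h3]
        rw [PySem.List.enumerate_cons]
        simp only [List.foldl_cons]
        rw [hstep, ihn rest hn (i + 1) (by omega) blocks]
        rw [pvScan, pvClosers_get]
        simp [h1, h2, h3]

-- ===== VERDICT (by name: the statement is the Claim_ definition above) =====
theorem extract_top_level_blocks_spec : Claim_equal_extract_top_level_blocks := by
  intro text _
  unfold Spec_extract_top_level_blocks extract_top_level_blocks extract_top_level_blocks_alt
  rw [pvIdle text text.toList.length text.toList (le_refl _) 0 (le_refl 0) []]
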